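-- pv_equiv track=rewrite | github.com/fergusq/tampio | voikko/voikkoutils.py | get_wordform_infl_vowel_type
-- ===== SOURCE A (Python) =====
-- VOWEL_FRONT=1
--
-- VOWEL_BACK=2
--
-- VOWEL_BOTH=3
--
-- def _simple_vowel_type(word):
-- 	word = word.lower()
-- 	last_back = max(word.rfind(u'a'), word.rfind(u'o'), word.rfind(u'å'), word.rfind(u'u'))
-- 	last_ord_front = max(word.rfind(u'ä'), word.rfind(u'ö'))
-- 	last_y = word.rfind(u'y')
-- 	if last_back > -1 and max(last_ord_front, last_y) == -1:
-- 		return VOWEL_BACK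
-- 	if last_back == -1 and max(last_ord_front, last_y) > -1:
-- 		return VOWEL_FRONT
-- 	if max(last_back, last_ord_front, last_y) == -1:
-- 		return VOWEL_FRONT
-- 	if last_y < max(last_back, last_ord_front):
-- 		if last_back > last_ord_front: return VOWEL_BACK
-- 		else: return VOWEL_FRONT
-- 	else:
-- 		return VOWEL_BOTH
--
-- def get_wordform_infl_vowel_type(wordform):
-- 	# Search for last '=' or '-', check the trailing part using recursion
-- 	startind = max(wordform.rfind(u'='), wordform.rfind(u'-'))
-- 	if startind == len(wordform) - 1: return VOWEL_BOTH # Not allowed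
-- 	if startind != -1: return get_wordform_infl_vowel_type(wordform[startind+1:])
--
-- 	# Search for first '|', check the trailing part using recursion
-- 	startind = wordform.find(u'|')
-- 	if startind == len(wordform) - 1: return VOWEL_BOTH # Not allowed
-- 	vtype_whole = _simple_vowel_type(wordform)
-- 	if startind == -1: return vtype_whole
-- 	vtype_part = get_wordform_infl_vowel_type(wordform[startind+1:])
-- 	if vtype_whole == vtype_part: return vtype_whole
-- 	else: return VOWEL_BOTH
-- ===== SOURCE B (Python) =====
-- VOWEL_FRONT = 1
-- VOWEL_BACK = 2
-- VOWEL_BOTH = 3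
--
-- def _simple_vowel_type(word):
--     word = word.lower()
--     last_back = max(word.rfind(u'a'), word.rfind(u'o'), word.rfind(u'\xe5'), word.rfind(u'u'))
--     last_ord_front = max(word.rfind(u'\xe4'), word.rfind(u'\xf6'))
--     last_y = word.rfind(u'y')
--     if last_back > -1 and max(last_ord_front, last_y) == -1:
--         return VOWEL_BACK
--     if last_back == -1 and max(last_ord_front, last_y) > -1:
--         return VOWEL_FRONT
--     if max(last_back, last_ord_front, last_y) == -1:
--         return VOWEL_FRONT
--     if last_y < max(last_back, last_ord_front):
--         if last_back > last_ord_front: return VOWEL_BACK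
--         else: return VOWEL_FRONT
--     else:
--         return VOWEL_BOTH
--
-- def get_wordform_infl_vowel_type(wordform):
--     # Iterative: strip to the part after the last '='/'-', then require that
--     # every '|'-suffix has the same simple vowel type.
--     i = max(wordform.rfind(u'='), wordform.rfind(u'-'))
--     if i == len(wordform) - 1:
--         return VOWEL_BOTH
--     if i != -1:
--         wordform = wordform[i+1:]
--     if wordform.endswith(u'|'):
--         return VOWEL_BOTH
--     t = _simple_vowel_type(wordform)
--     rest = wordform
--     while True:
--         j = rest.find(u'|')
--         if j == -1:
--             return t
--         rest = rest[j+1:]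
--         if _simple_vowel_type(rest) != t:
--             return VOWEL_BOTH
-- ===== Notes on version B (the rewrite author's own statement) =====
-- stated objective: alternative
-- what changed: A's two levels of recursion (re-entering the whole function after the '='/'-' strip and for every '|' segment) are replaced by one non-recursive strip step, an endswith guard, and a single iterative loop that compares the simple vowel type of each successive '|'-suffix against the type of the whole stripped word.
import Mathlib
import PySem

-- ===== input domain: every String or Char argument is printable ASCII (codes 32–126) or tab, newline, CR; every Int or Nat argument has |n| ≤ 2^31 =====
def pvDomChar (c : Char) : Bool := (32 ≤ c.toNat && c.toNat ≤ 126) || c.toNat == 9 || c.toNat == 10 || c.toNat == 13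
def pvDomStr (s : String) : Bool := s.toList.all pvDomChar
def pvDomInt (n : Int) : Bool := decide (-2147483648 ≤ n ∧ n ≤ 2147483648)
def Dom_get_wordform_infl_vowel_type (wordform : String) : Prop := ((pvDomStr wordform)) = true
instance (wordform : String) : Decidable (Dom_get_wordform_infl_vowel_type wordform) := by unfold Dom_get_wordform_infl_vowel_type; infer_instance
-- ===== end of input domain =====

-- B replaces A's two levels of recursion by one strip step plus an iterative scan
-- comparing the simple vowel type of every '|'-suffix; objective: alternative decomposition.

-- shared helper: port of _simple_vowel_type (identical in Source A and Source B)
def pvSimple (word0 : List Char) : Int :=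
  let word := PySem.Chars.lower word0
  let last_back := max (max (max (PySem.Chars.rfind word ['a']) (PySem.Chars.rfind word ['o'])) (PySem.Chars.rfind word ['å'])) (PySem.Chars.rfind word ['u'])
  let last_ord_front := max (PySem.Chars.rfind word ['ä']) (PySem.Chars.rfind word ['ö'])
  let last_y := PySem.Chars.rfind word ['y']
  if last_back > -1 ∧ max last_ord_front last_y = -1 then 2
  else if last_back = -1 ∧ max last_ord_front last_y > -1 then 1
  else if max (max last_back last_ord_front) last_y = -1 then 1
  else if last_y < max last_back last_ord_front then
    (if last_back > last_ord_front then 2 else 1)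
  else 3

-- unfolding equations for PySem.Chars.rfind.go
theorem pv_go_zero (s sub : List Char) :
    PySem.Chars.rfind.go s sub 0 = if sub.isPrefixOf s then 0 else -1 := by
  rw [PySem.Chars.rfind.go.eq_def]

theorem pv_go_succ (s sub : List Char) (j : Nat) :
    PySem.Chars.rfind.go s sub (j + 1) =
      if sub.isPrefixOf (s.drop (j + 1)) then ((j : Int) + 1) else PySem.Chars.rfind.go s sub j := by
  rw [PySem.Chars.rfind.go.eq_def]; norm_num

-- bounds on rfind/find, needed by the ports' termination arguments
theorem pv_neg_one_le_rfind_go (s sub : List Char) (j : Nat) :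
    -1 ≤ PySem.Chars.rfind.go s sub j := by
  induction j with
  | zero => rw [pv_go_zero]; split <;> norm_num
  | succ j ih =>
    rw [pv_go_succ]
    split
    · omega
    · exact ih

theorem pv_neg_one_le_rfind (s sub : List Char) : -1 ≤ PySem.Chars.rfind s sub :=
  pv_neg_one_le_rfind_go s sub s.length

theorem pv_rfind_go_le (s sub : List Char) (j : Nat) :
    PySem.Chars.rfind.go s sub j ≤ (j : Int) := by
  induction j with
  | zero => rw [pv_go_zero]; split <;> norm_num
  | succ j ih =>
    rw [pv_go_succ]
    split
    · push_cast; omega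
    · have := ih; push_cast; omega

theorem pv_rfind_lt_length (s sub : List Char) (hsub : sub ≠ []) :
    PySem.Chars.rfind s sub < (s.length : Int) := by
  show PySem.Chars.rfind.go s sub s.length < (s.length : Int)
  have hnp : ∀ m, s.length ≤ m → sub.isPrefixOf (s.drop m) = false := by
    intro m hm
    have hnil : s.drop m = [] := List.drop_eq_nil_iff.mpr hm
    rw [hnil]
    cases sub with
    | nil => exact absurd rfl hsub
    | cons a t => simp [List.isPrefixOf]
  cases hL : s.length with
  | zero =>
    rw [pv_go_zero]
    have h0 := hnp 0 (by omega)
    rw [List.drop_zero] at h0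
    rw [h0]
    norm_num
  | succ j =>
    rw [pv_go_succ]
    have h0 := hnp (j + 1) (by omega)
    rw [h0]
    simp only [Bool.false_eq_true, if_false]
    have := pv_rfind_go_le s sub j
    push_cast
    omega

theorem pv_find_toNat_lt (s sub : List Char) (hsub : sub ≠ [])
    (h : PySem.Chars.find s sub ≠ -1) :
    (PySem.Chars.find s sub).toNat < s.length := by
  have h0 : 0 ≤ PySem.Chars.find s sub := by
    have := PySem.Chars.neg_one_le_find s sub; omega
  obtain ⟨hpre, -⟩ := PySem.Chars.find_spec h0
  have hne : List.drop (PySem.Chars.find s sub).toNat s ≠ [] := by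
    intro hnil
    rw [hnil] at hpre
    exact hsub (List.prefix_nil.mp hpre)
  have := List.drop_eq_nil_iff.not.mp hne
  omega

-- ===== PORT A =====
def pvA (s : List Char) : Int :=
  let startind := max (PySem.Chars.rfind s ['=']) (PySem.Chars.rfind s ['-'])
  if h1 : startind = (s.length : Int) - 1 then 3
  else if h2 : startind ≠ -1 then
    pvA (PySem.List.slice s (some (startind + 1)) none)
  else
    let startind2 := PySem.Chars.find s ['|']
    if h3 : startind2 = (s.length : Int) - 1 then 3
    else
      let vtype_whole := pvSimple s
      if h4 : startind2 = -1 then vtype_whole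
      else
        let vtype_part := pvA (PySem.List.slice s (some (startind2 + 1)) none)
        if vtype_whole = vtype_part then vtype_whole else 3
termination_by s.length
decreasing_by
  · have ha := pv_neg_one_le_rfind s ['=']
    have hb := pv_neg_one_le_rfind s ['-']
    have hc := pv_rfind_lt_length s ['='] (by simp)
    have hd := pv_rfind_lt_length s ['-'] (by simp)
    simp only [startind] at h1 h2 ⊢
    rcases max_choice (PySem.Chars.rfind s ['=']) (PySem.Chars.rfind s ['-']) with hm | hm
    · rw [hm] at h1 h2 ⊢
      rw [PySem.List.slice_from s (a := PySem.Chars.rfind s ['='] + 1) (by omega)]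
      simp only [List.length_drop]
      omega
    · rw [hm] at h1 h2 ⊢
      rw [PySem.List.slice_from s (a := PySem.Chars.rfind s ['-'] + 1) (by omega)]
      simp only [List.length_drop]
      omega
  · have ha := PySem.Chars.neg_one_le_find s ['|']
    simp only [startind2] at h4 ⊢
    have hc := pv_find_toNat_lt s ['|'] (by simp) h4
    rw [PySem.List.slice_from s (a := PySem.Chars.find s ['|'] + 1) (by omega)]
    simp only [List.length_drop]
    omega

def get_wordform_infl_vowel_type (wordform : String) : Int := pvA wordform.toList

-- ===== PORT B =====
-- the while-loop of Source B: scan successive '|'-suffixes, comparing each simple type with t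
def pvBLoop (t : Int) (rest : List Char) : Int :=
  let j := PySem.Chars.find rest ['|']
  if h : j = -1 then t
  else
    let rest' := PySem.List.slice rest (some (j + 1)) none
    if pvSimple rest' ≠ t then 3 else pvBLoop t rest'
termination_by rest.length
decreasing_by
  have ha := PySem.Chars.neg_one_le_find rest ['|']
  simp only [j] at h ⊢
  have hc := pv_find_toNat_lt rest ['|'] (by simp) h
  rw [PySem.List.slice_from rest (a := PySem.Chars.find rest ['|'] + 1) (by omega)]
  simp only [List.length_drop]
  omega

def get_wordform_infl_vowel_type_alt (wordform : String) : Int :=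
  let s := wordform.toList
  let i := max (PySem.Chars.rfind s ['=']) (PySem.Chars.rfind s ['-'])
  if i = (s.length : Int) - 1 then 3
  else
    let s2 := if i ≠ -1 then PySem.List.slice s (some (i + 1)) none else s
    if PySem.Chars.endswith s2 ['|'] then 3
    else pvBLoop (pvSimple s2) s2

-- ===== PRECONDITION & SPEC =====
def Spec_get_wordform_infl_vowel_type (wordform : String) (out : Int) : Prop := out = get_wordform_infl_vowel_type_alt wordform
instance (wordform : String) (out : Int) : Decidable (Spec_get_wordform_infl_vowel_type wordform out) := by unfold Spec_get_wordform_infl_vowel_type; infer_instance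

-- ===== CLAIM (what is proved, stated in full; the proofs are below) =====
def Claim_equal_get_wordform_infl_vowel_type : Prop := ∀ (wordform : String), Dom_get_wordform_infl_vowel_type wordform → Spec_get_wordform_infl_vowel_type wordform (get_wordform_infl_vowel_type wordform)

-- ===== LEMMAS AND PROOFS =====

theorem pv_go_neg_iff (s sub : List Char) (j : Nat) :
    PySem.Chars.rfind.go s sub j = -1 ↔ ∀ i ≤ j, ¬ sub <+: s.drop i := by
  induction j with
  | zero =>
    rw [pv_go_zero]
    by_cases h : sub.isPrefixOf s = true
    · have hp := List.isPrefixOf_iff_prefix.mp h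
      simp only [h, if_true]
      constructor
      · intro h0; cases (by norm_num : ¬ ((0 : Int) = -1)) h0
      · intro hall; cases (hall 0 (le_refl 0)) (by simpa using hp)
    · have hp : ¬ sub <+: s := fun hc => h (List.isPrefixOf_iff_prefix.mpr hc)
      simp only [Bool.not_eq_true] at h
      simp only [h, Bool.false_eq_true, if_false]
      constructor
      · intro _ i hi
        interval_cases i
        simpa using hp
      · intro _; trivial
  | succ j ih =>
    rw [pv_go_succ]
    by_cases h : sub.isPrefixOf (s.drop (j + 1)) = true
    · have hp := List.isPrefixOf_iff_prefix.mp h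
      simp only [h, if_true]
      constructor
      · intro h0; exact absurd h0 (by omega)
      · intro hall; exact absurd hp (hall (j + 1) (le_refl _))
    · have hp : ¬ sub <+: s.drop (j + 1) := fun hc => h (List.isPrefixOf_iff_prefix.mpr hc)
      simp only [Bool.not_eq_true] at h
      simp only [h, Bool.false_eq_true, if_false]
      rw [ih]
      constructor
      · intro hall i hi
        rcases Nat.lt_or_ge i (j + 1) with hlt | hge
        · exact hall i (by omega)
        · have hie : i = j + 1 := by omega
          subst hie
          exact hp
      · intro hall i hi
        exact hall i (by omega)

theorem pv_rfind_neg_iff (s sub : List Char) (hsub : sub ≠ []) :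
    PySem.Chars.rfind s sub = -1 ↔ ¬ sub <:+: s := by
  show PySem.Chars.rfind.go s sub s.length = -1 ↔ _
  rw [pv_go_neg_iff]
  rw [← PySem.Chars.isIn_iff_infix, ← PySem.Chars.exists_prefix_drop_iff_isIn]
  constructor
  · rintro h ⟨i, hp⟩
    rcases Nat.lt_or_ge s.length i with hgt | hge
    · have hnil : s.drop i = [] := List.drop_eq_nil_iff.mpr (by omega)
      rw [hnil] at hp
      exact hsub (List.prefix_nil.mp hp)
    · exact h i hge hp
  · intro h i _ hp
    exact h ⟨i, hp⟩

theorem pv_rfind_ge (s sub : List Char) (hsub : sub ≠ []) (p : Nat)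
    (h : sub <+: s.drop p) : (p : Int) ≤ PySem.Chars.rfind s sub := by
  have hp : p ≤ s.length := by
    have hne : s.drop p ≠ [] := by
      intro hnil; rw [hnil] at h; exact hsub (List.prefix_nil.mp h)
    have := List.drop_eq_nil_iff.not.mp hne
    omega
  show (p : Int) ≤ PySem.Chars.rfind.go s sub s.length
  have aux : ∀ j, p ≤ j → (p : Int) ≤ PySem.Chars.rfind.go s sub j := by
    intro j
    induction j with
    | zero =>
      intro hj
      have hp0 : p = 0 := by omega
      subst hp0
      rw [pv_go_zero, if_pos (List.isPrefixOf_iff_prefix.mpr (by simpa using h))]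
      norm_num
    | succ j ih =>
      intro hj
      rw [pv_go_succ]
      by_cases hpre : sub.isPrefixOf (s.drop (j + 1)) = true
      · rw [if_pos hpre]; omega
      · rw [if_neg hpre]
        rcases Nat.lt_or_ge p (j + 1) with hlt | hge
        · exact ih (by omega)
        · have hpe : p = j + 1 := by omega
          subst hpe
          exact absurd (List.isPrefixOf_iff_prefix.mpr h) hpre
  exact aux s.length hp

theorem pv_rfind_drop_neg (s sub : List Char) (hsub : sub ≠ []) (k : Nat)
    (hk : PySem.Chars.rfind s sub < (k : Int)) :
    PySem.Chars.rfind (s.drop k) sub = -1 := by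
  rw [pv_rfind_neg_iff _ _ hsub]
  intro hin
  obtain ⟨j, hp⟩ := (PySem.Chars.exists_prefix_drop_iff_isIn sub (s.drop k)).mpr
    ((PySem.Chars.isIn_iff_infix sub (s.drop k)).mpr hin)
  rw [List.drop_drop] at hp
  have := pv_rfind_ge s sub hsub (k + j) hp
  push_cast at this
  omega

-- singleton endswith is stable under a proper drop
theorem pv_endswith_drop (s : List Char) (c : Char) (k : Nat) (hk : k < s.length) :
    PySem.Chars.endswith (s.drop k) [c] = PySem.Chars.endswith s [c] := by
  rw [Bool.eq_iff_iff, PySem.Chars.endswith_iff, PySem.Chars.endswith_iff]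
  constructor
  · intro hsuf
    exact hsuf.trans (List.drop_suffix k s)
  · rintro ⟨u, hu⟩
    refine ⟨u.drop k, ?_⟩
    have hlen : s.length = u.length + 1 := by rw [← hu]; simp
    have hdk : List.drop k (u ++ [c]) = List.drop k u ++ [c] :=
      List.drop_append_of_le_length (by omega)
    rw [← hu, hdk]

theorem pv_find_lastpos_endswith (s : List Char) (c : Char) (hs : s ≠ [])
    (h : PySem.Chars.find s [c] = (s.length : Int) - 1) :
    PySem.Chars.endswith s [c] = true := by
  have hlen : s.length ≠ 0 := fun h0 => hs (List.length_eq_zero_iff.mp h0)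
  have h0 : 0 ≤ PySem.Chars.find s [c] := by rw [h]; omega
  obtain ⟨hpre, -⟩ := PySem.Chars.find_spec h0
  rw [h] at hpre
  have htn : ((s.length : Int) - 1).toNat = s.length - 1 := by omega
  rw [htn] at hpre
  have hd1 : (s.drop (s.length - 1)).length = 1 := by
    simp only [List.length_drop]; omega
  have heq : [c] = s.drop (s.length - 1) := hpre.eq_of_length (by rw [hd1]; rfl)
  rw [PySem.Chars.endswith_iff, heq]
  exact List.drop_suffix _ s

theorem pv_endswith_find_ne (s : List Char) (c : Char)
    (h : PySem.Chars.endswith s [c] = true) : PySem.Chars.find s [c] ≠ -1 := by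
  rw [ne_eq, PySem.Chars.find_eq_neg_one_iff, not_not]
  exact ((PySem.Chars.endswith_iff s [c]).mp h).isInfix

-- pvBLoop only ever returns t or 3
theorem pv_bloop_range : ∀ (n : Nat) (rest : List Char), rest.length = n →
    ∀ t, pvBLoop t rest = t ∨ pvBLoop t rest = 3 := by
  intro n
  induction n using Nat.strong_induction_on with
  | _ n ih =>
    intro rest hn t
    rw [pvBLoop]
    by_cases h : PySem.Chars.find rest ['|'] = -1
    · rw [dif_pos h]
      left; rfl
    · rw [dif_neg h]
      by_cases h2 : pvSimple (PySem.List.slice rest (some (PySem.Chars.find rest ['|'] + 1)) none) ≠ t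
      · rw [if_pos h2]
        right; rfl
      · rw [if_neg h2]
        have h3 := PySem.Chars.neg_one_le_find rest ['|']
        have hft := pv_find_toNat_lt rest ['|'] (by simp) h
        rw [PySem.List.slice_from rest (a := PySem.Chars.find rest ['|'] + 1) (by omega)]
        exact ih (rest.drop (PySem.Chars.find rest ['|'] + 1).toNat).length
          (by simp only [List.length_drop]; omega) _ rfl t

-- the crux: on a word with no '=' and no '-', A's recursion equals B's endswith
-- guard plus suffix scan
theorem pv_main : ∀ (n : Nat) (s : List Char), s.length = n → s ≠ [] →
    PySem.Chars.rfind s ['='] = -1 → PySem.Chars.rfind s ['-'] = -1 →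
    pvA s = (if PySem.Chars.endswith s ['|'] then 3 else pvBLoop (pvSimple s) s) := by
  intro n
  induction n using Nat.strong_induction_on with
  | _ n ih =>
    intro s hn hne hEq hDash
    have hlen : s.length ≠ 0 := fun h0 => hne (List.length_eq_zero_iff.mp h0)
    rw [pvA]
    simp only [hEq, hDash, max_self]
    rw [dif_neg (by omega), dif_neg (by simp)]
    set f := PySem.Chars.find s ['|'] with hf
    have hf1 := PySem.Chars.neg_one_le_find s ['|']
    by_cases hend : PySem.Chars.endswith s ['|'] = true
    · -- trailing '|': everything collapses to 3
      rw [if_pos hend]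
      have hfne : f ≠ -1 := pv_endswith_find_ne s '|' hend
      by_cases hlast : f = (s.length : Int) - 1
      · rw [dif_pos hlast]
      · rw [dif_neg hlast, dif_neg hfne]
        have hft : f.toNat < s.length := pv_find_toNat_lt s ['|'] (by simp) hfne
        have hf0 : 0 ≤ f := by omega
        rw [PySem.List.slice_from s (a := f + 1) (by omega)]
        set k := (f + 1).toNat with hk
        have hkl : k < s.length := by omega
        have hs1ne : s.drop k ≠ [] := by
          rw [ne_eq, List.drop_eq_nil_iff]; omega
        have hr1 : PySem.Chars.rfind (s.drop k) ['='] = -1 :=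
          pv_rfind_drop_neg s ['='] (by simp) k (by rw [hEq]; omega)
        have hr2 : PySem.Chars.rfind (s.drop k) ['-'] = -1 :=
          pv_rfind_drop_neg s ['-'] (by simp) k (by rw [hDash]; omega)
        have hend1 : PySem.Chars.endswith (s.drop k) ['|'] = true := by
          rw [pv_endswith_drop s '|' k hkl]; exact hend
        have hrec := ih (s.drop k).length (by simp only [List.length_drop]; omega)
          (s.drop k) rfl hs1ne hr1 hr2
        rw [hrec, if_pos hend1]
        split_ifs with hx
        · exact hx
        · rfl
    · -- no trailing '|'
      rw [if_neg hend]
      rw [pvBLoop]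
      simp only [← hf]
      by_cases hfneg : f = -1
      · rw [dif_neg (by omega), dif_pos hfneg, dif_pos hfneg]
      · have hlast : f ≠ (s.length : Int) - 1 := by
          intro hc
          exact hend (pv_find_lastpos_endswith s '|' hne hc)
        rw [dif_neg hlast, dif_neg hfneg, dif_neg hfneg]
        have hft : f.toNat < s.length := pv_find_toNat_lt s ['|'] (by simp) hfneg
        have hf0 : 0 ≤ f := by omega
        rw [PySem.List.slice_from s (a := f + 1) (by omega)]
        set k := (f + 1).toNat with hk
        have hkl : k < s.length := by omega
        have hs1ne : s.drop k ≠ [] := by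
          rw [ne_eq, List.drop_eq_nil_iff]; omega
        have hr1 : PySem.Chars.rfind (s.drop k) ['='] = -1 :=
          pv_rfind_drop_neg s ['='] (by simp) k (by rw [hEq]; omega)
        have hr2 : PySem.Chars.rfind (s.drop k) ['-'] = -1 :=
          pv_rfind_drop_neg s ['-'] (by simp) k (by rw [hDash]; omega)
        have hend1 : PySem.Chars.endswith (s.drop k) ['|'] = false := by
          rw [pv_endswith_drop s '|' k hkl]
          exact Bool.eq_false_iff.mpr (by simpa using hend)
        have hend1' : ¬ (PySem.Chars.endswith (s.drop k) ['|'] = true) := by simp [hend1]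
        have hrec := ih (s.drop k).length (by simp only [List.length_drop]; omega)
          (s.drop k) rfl hs1ne hr1 hr2
        rw [hrec, if_neg hend1']
        set t0 := pvSimple s with ht0
        set t1 := pvSimple (s.drop k) with ht1
        by_cases ht : t1 = t0
        · rw [ht]
          rcases pv_bloop_range (s.drop k).length (s.drop k) rfl t0 with h0 | h0 <;>
            rw [h0] <;> split_ifs <;> omega
        · rcases pv_bloop_range (s.drop k).length (s.drop k) rfl t1 with h1 | h1 <;>
            rcases pv_bloop_range (s.drop k).length (s.drop k) rfl t0 with h0 | h0 <;>
            rw [h1, h0] <;> split_ifs <;> omega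

-- ===== VERDICT (by name: the statement is the Claim_ definition above) =====
theorem get_wordform_infl_vowel_type_spec : Claim_equal_get_wordform_infl_vowel_type := by
  intro wordform _
  unfold Spec_get_wordform_infl_vowel_type
  unfold get_wordform_infl_vowel_type get_wordform_infl_vowel_type_alt
  set s := wordform.toList with hs
  set i := max (PySem.Chars.rfind s ['=']) (PySem.Chars.rfind s ['-']) with hi
  have ha := pv_neg_one_le_rfind s ['=']
  have hb := pv_neg_one_le_rfind s ['-']
  have hc := pv_rfind_lt_length s ['='] (by simp)
  have hd := pv_rfind_lt_length s ['-'] (by simp)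
  have ham : PySem.Chars.rfind s ['='] ≤ i :=
    le_max_left _ _
  have hbm : PySem.Chars.rfind s ['-'] ≤ i :=
    le_max_right _ _
  have him : i = PySem.Chars.rfind s ['='] ∨ i = PySem.Chars.rfind s ['-'] :=
    max_choice _ _
  by_cases h1 : i = (s.length : Int) - 1
  · rw [pvA]
    simp only [← hi]
    rw [dif_pos h1, if_pos h1]
  · rw [if_neg h1]
    by_cases h2 : i = -1
    · -- no '=' or '-': both sides reduce to pv_main on s
      have hEq : PySem.Chars.rfind s ['='] = -1 := by omega
      have hDash : PySem.Chars.rfind s ['-'] = -1 := by omega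
      have hne : s ≠ [] := by
        intro hnil
        apply h1
        rw [hnil, h2]
        simp
      have hs2 : (if i ≠ -1 then PySem.List.slice s (some (i + 1)) none else s) = s := by
        simp [h2]
      rw [hs2]
      rw [pvA]
      simp only [← hi]
      rw [dif_neg h1]
      rw [dif_neg (by simp [h2])]
      have hm := pv_main s.length s rfl hne hEq hDash
      rw [pvA] at hm
      simp only [← hi] at hm
      rw [dif_neg h1] at hm
      rw [dif_neg (by simp [h2])] at hm
      exact hm
    · -- strip to the part after the last '='/'-'
      have hi0 : 0 ≤ i := by omega
      have hilt : i < (s.length : Int) := by rcases him with hm | hm <;> omega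
      have hs2 : (if i ≠ -1 then PySem.List.slice s (some (i + 1)) none else s)
          = PySem.List.slice s (some (i + 1)) none := by
        simp [h2]
      rw [hs2]
      rw [pvA]
      simp only [← hi]
      rw [dif_neg h1, dif_pos h2]
      rw [PySem.List.slice_from s (a := i + 1) (by omega)]
      set k := (i + 1).toNat with hk
      have hkl : k < s.length := by omega
      have hs1ne : s.drop k ≠ [] := by
        rw [ne_eq, List.drop_eq_nil_iff]; omega
      have hr1 : PySem.Chars.rfind (s.drop k) ['='] = -1 :=
        pv_rfind_drop_neg s ['='] (by simp) k (by omega)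
      have hr2 : PySem.Chars.rfind (s.drop k) ['-'] = -1 :=
        pv_rfind_drop_neg s ['-'] (by simp) k (by omega)
      exact pv_main (s.drop k).length (s.drop k) rfl hs1ne hr1 hr2
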